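-- pv_equiv track=rewrite | github.com/ntkjer/epi_python | epi_judge_python/longest_nondecreasing_subsequence.py | nlgn_longest_nondecreasing_subsequence_length
-- ===== SOURCE A (Python) =====
-- from typing import List
--
-- def nlgn_longest_nondecreasing_subsequence_length(A: List[int]) -> int:
--     tails = [1] * len(A)
--     size = 0
--     for x in A:
--         i, j = 0, size
--         while i != j:
--             m = (i + j) // 2
--             if tails[m] < x:
--                 i = m + 1
--             else:
--                 j = m
--         tails[i] = x
--         size = max(i + 1, size)
--
--     return size
-- ===== SOURCE B (Python) =====
-- def nlgn_longest_nondecreasing_subsequence_length(A):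
--     tails = []
--     for x in A:
--         if not tails or tails[-1] < x:
--             tails.append(x)
--         else:
--             k = 0
--             while k < len(tails) and tails[k] < x:
--                 k += 1
--             tails[k] = x
--     return len(tails)
-- ===== Notes on version B (the rewrite author's own statement) =====
-- stated objective: simpler
-- what changed: B maintains the tails in a growing list, appending directly when the new element extends it and otherwise replacing at a position found by linear scan, instead of A's binary search over a preallocated filler array with a separate size counter.
import Mathlib
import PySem

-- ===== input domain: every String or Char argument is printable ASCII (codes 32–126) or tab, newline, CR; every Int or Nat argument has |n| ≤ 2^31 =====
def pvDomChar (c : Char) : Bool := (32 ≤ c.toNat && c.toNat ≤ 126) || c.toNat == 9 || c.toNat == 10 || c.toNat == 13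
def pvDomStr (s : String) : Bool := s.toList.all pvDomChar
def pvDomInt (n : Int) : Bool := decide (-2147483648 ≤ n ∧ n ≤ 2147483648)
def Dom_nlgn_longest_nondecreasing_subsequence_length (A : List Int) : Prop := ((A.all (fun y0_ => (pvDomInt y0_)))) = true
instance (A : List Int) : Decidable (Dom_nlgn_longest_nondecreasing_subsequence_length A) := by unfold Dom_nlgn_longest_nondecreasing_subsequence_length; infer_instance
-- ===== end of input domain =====

-- B keeps A's sorted-tails invariant but in a growing list: append when x extends the tails,
-- otherwise replace at a linearly scanned position — no binary search, no preallocated filler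
-- array, no size counter (objective: simpler; worst case O(n^2) vs A's O(n log n)).

-- ===== PORT A =====
-- Python's `while i != j` binary search; in every call i ≤ j, so `i ≠ j` is `i < j`
-- (written as a dependent if for termination). `tails[m]` is always in range in A's
-- reachable states; getD 0 is exact there.
def pvBsearch (tails : List Int) (x : Int) (i j : Nat) : Nat :=
  if h : i < j then
    let m := (i + j) / 2
    if tails.getD m 0 < x then pvBsearch tails x (m + 1) j
    else pvBsearch tails x i m
  else i
termination_by j - i
decreasing_by all_goals (simp only [m] at *; try omega)

-- the body of A's `for x in A` loop, state (tails, size); size is a nonnegative int, kept as Nat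
def pvStepA (st : List Int × Nat) (x : Int) : List Int × Nat :=
  let i := pvBsearch st.1 x 0 st.2
  (st.1.set i x, max (i + 1) st.2)

def nlgn_longest_nondecreasing_subsequence_length (A : List Int) : Int :=
  (A.foldl pvStepA (List.replicate A.length 1, 0)).2

-- ===== PORT B =====
-- `k = 0; while k < len(tails) and tails[k] < x: k += 1`, as structural recursion
def pvScan (tails : List Int) (x : Int) : Nat :=
  match tails with
  | [] => 0
  | t :: ts => if t < x then pvScan ts x + 1 else 0

-- `if not tails or tails[-1] < x: append else: linear scan, replace`
def pvStepB (tails : List Int) (x : Int) : List Int :=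
  match tails.getLast? with
  | none => tails ++ [x]
  | some t => if t < x then tails ++ [x] else tails.set (pvScan tails x) x

def nlgn_longest_nondecreasing_subsequence_length_alt (A : List Int) : Int :=
  (A.foldl pvStepB []).length

-- ===== PRECONDITION & SPEC =====
def Spec_nlgn_longest_nondecreasing_subsequence_length (A : List Int) (out : Int) : Prop := out = nlgn_longest_nondecreasing_subsequence_length_alt A
instance (A : List Int) (out : Int) : Decidable (Spec_nlgn_longest_nondecreasing_subsequence_length A out) := by unfold Spec_nlgn_longest_nondecreasing_subsequence_length; infer_instance

-- ===== CLAIM (what is proved, stated in full; the proofs are below) =====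
def Claim_equal_nlgn_longest_nondecreasing_subsequence_length : Prop := ∀ (A : List Int), Dom_nlgn_longest_nondecreasing_subsequence_length A → Spec_nlgn_longest_nondecreasing_subsequence_length A (nlgn_longest_nondecreasing_subsequence_length A)

-- ===== LEMMAS AND PROOFS =====

lemma pvScan_le_length (L : List Int) (x : Int) : pvScan L x ≤ L.length := by
  induction L with
  | nil => simp [pvScan]
  | cons t ts ih => simp only [pvScan, List.length_cons]; split <;> omega

-- every position strictly before the scan index holds an element < x
lemma pvScan_prefix (L : List Int) (x : Int) (k : Nat) (hk : k < pvScan L x) :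
    k < L.length ∧ L.getD k 0 < x := by
  induction L generalizing k with
  | nil => simp [pvScan] at hk
  | cons t ts ih =>
    simp only [pvScan] at hk
    by_cases h : t < x
    · simp only [if_pos h] at hk
      cases k with
      | zero => simpa using h
      | succ k =>
        have := ih k (by omega)
        simpa using this
    · simp [if_neg h] at hk

-- in a strictly sorted list, an element < x pushes the scan index past it
lemma pvScan_ge (L : List Int) (x : Int) (m : Nat) (hs : L.Pairwise (· < ·))
    (hm : m < L.length) (hlt : L.getD m 0 < x) : m < pvScan L x := by
  induction L generalizing m with
  | nil => simp at hm
  | cons t ts ih =>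
    rcases List.pairwise_cons.1 hs with ⟨ht, hts⟩
    cases m with
    | zero =>
      simp only [List.getD_cons_zero] at hlt
      simp [pvScan, hlt]
    | succ m =>
      simp only [List.getD_cons_succ] at hlt
      simp only [List.length_cons] at hm
      have h1 : m < pvScan ts x := ih m hts (by omega) hlt
      have ht' : t < x := by
        have : t < ts.getD m 0 := by
          rw [List.getD_eq_getElem ts 0 (by omega)]
          exact ht _ (List.getElem_mem (by omega))
        omega
      simp only [pvScan, if_pos ht']
      omega

-- an element ≥ x bounds the scan index
lemma pvScan_le (L : List Int) (x : Int) (m : Nat)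
    (hm : m < L.length) (hge : ¬ L.getD m 0 < x) : pvScan L x ≤ m := by
  induction L generalizing m with
  | nil => simp at hm
  | cons t ts ih =>
    cases m with
    | zero =>
      simp only [List.getD_cons_zero] at hge
      simp [pvScan, hge]
    | succ m =>
      simp only [List.getD_cons_succ] at hge
      simp only [List.length_cons] at hm
      simp only [pvScan]
      split
      · have := ih m (by omega) hge; try omega
      · omega

-- A's binary search over the first s entries computes B's scan index
lemma pvBsearch_eq (T : List Int) (x : Int) (s : Nat) (hs : s ≤ T.length)
    (hsort : (T.take s).Pairwise (· < ·)) :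
    ∀ n i j, j - i ≤ n → i ≤ pvScan (T.take s) x → pvScan (T.take s) x ≤ j → j ≤ s →
      pvBsearch T x i j = pvScan (T.take s) x := by
  intro n
  induction n with
  | zero =>
    intro i j h1 h2 h3 h4
    rw [pvBsearch]
    simp only [dif_neg (by omega : ¬ i < j)]
    omega
  | succ n ih =>
    intro i j h1 h2 h3 h4
    rw [pvBsearch]
    by_cases hij : i < j
    · simp only [dif_pos hij]
      set m := (i + j) / 2 with hm
      have hm1 : i ≤ m := by omega
      have hm2 : m < j := by omega
      have hmlen : m < (T.take s).length := by
        simp only [List.length_take]; try omega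
      have hget : T.getD m 0 = (T.take s).getD m 0 := by
        rw [List.getD_eq_getElem?_getD, List.getD_eq_getElem?_getD,
            List.getElem?_take_of_lt (by omega)]
      rw [hget]
      by_cases hlt : (T.take s).getD m 0 < x
      · simp only [if_pos hlt]
        have := pvScan_ge (T.take s) x m hsort hmlen hlt
        exact ih (m + 1) j (by omega) (by omega) h3 h4
      · simp only [if_neg hlt]
        have := pvScan_le (T.take s) x m hmlen hlt
        exact ih i m (by omega) h2 (by omega) (by omega)
    · simp only [dif_neg hij]; try omega

-- strict sortedness is preserved when replacing the element at the scan index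
lemma pairwise_set_scan (L : List Int) (x : Int) (hs : L.Pairwise (· < ·))
    (hlen : pvScan L x < L.length) :
    (L.set (pvScan L x) x).Pairwise (· < ·) := by
  set c := pvScan L x with hc
  have hge : ¬ L.getD c 0 < x := fun h => by
    have := pvScan_ge L x c hs hlen h; try omega
  rw [List.getD_eq_getElem L 0 hlen] at hge
  rw [List.pairwise_iff_getElem] at hs ⊢
  intro a b ha hb hab
  simp only [List.length_set] at ha hb
  rw [List.getElem_set, List.getElem_set]
  by_cases hca : c = a
  · subst hca
    simp only [if_neg (by omega : ¬ c = b)]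
    have := hs c b hlen hb hab
    omega
  · simp only [if_neg hca]
    by_cases hcb : c = b
    · subst hcb
      have hp := pvScan_prefix L x a (by omega)
      rw [List.getD_eq_getElem L 0 (by omega)] at hp
      omega
    · simp only [if_neg hcb]
      exact hs a b ha hb hab

-- taking commutes with an in-range replacement
lemma take_set_lt (T : List Int) (x : Int) (c s : Nat) (_h : c < s) :
    (T.set c x).take s = (T.take s).set c x := by
  apply List.ext_getElem
  · simp
  · intro i h1 h2
    simp only [List.length_take, List.length_set] at h1
    rw [List.getElem_take, List.getElem_set, List.getElem_set]
    by_cases hci : c = i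
    · simp [hci]
    · simp only [if_neg hci]
      rw [List.getElem_take]

-- writing just past the taken prefix appends to it
lemma take_set_append (T : List Int) (x : Int) (s : Nat) (h : s < T.length) :
    (T.set s x).take (s + 1) = T.take s ++ [x] := by
  apply List.ext_getElem
  · simp; try omega
  · intro i h1 h2
    simp only [List.length_take, List.length_set] at h1
    rw [List.getElem_take, List.getElem_set]
    by_cases hsi : s = i
    · simp only [if_pos hsi]
      rw [List.getElem_append_right (by simp [List.length_take]; try omega)]
      simp [List.length_take, hsi]
    · simp only [if_neg hsi]
      rw [List.getElem_append_left (by simp [List.length_take]; try omega)]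
      rw [List.getElem_take]

-- the loop invariant: B's tails list is the first `size` entries of A's array (strictly sorted)
lemma pv_loop_eq : ∀ (r : List Int) (T : List Int) (s : Nat) (L : List Int),
    L = T.take s → s ≤ T.length → s + r.length ≤ T.length → L.Pairwise (· < ·) →
    (r.foldl pvStepA (T, s)).2 = (r.foldl pvStepB L).length := by
  intro r
  induction r with
  | nil =>
    intro T s L hL hs _ _
    simp [hL, List.length_take]
    omega
  | cons x r ih =>
    intro T s L hL hs hbudget hsort
    have hLlen : L.length = s := by simp [hL, List.length_take]; try omega
    have hscan := pvScan_le_length L x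
    have hbs : pvBsearch T x 0 s = pvScan L x := by
      rw [hL] at hsort ⊢
      exact pvBsearch_eq T x s hs hsort s 0 s (by omega)
        (by omega) (by rw [← hL]; try omega) (le_refl s)
    simp only [List.foldl_cons]
    by_cases hcs : pvScan L x = s
    · -- append case
      have hslen : s < T.length := by simp at hbudget; try omega
      have hstepA : pvStepA (T, s) x = (T.set s x, s + 1) := by
        simp [pvStepA, hbs, hcs]; try omega
      have hstepB : pvStepB L x = L ++ [x] := by
        unfold pvStepB
        match hlast : L.getLast? with
        | none => simp
        | some t =>
          have hne : L ≠ [] := by intro h; subst h; simp at hlast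
          have hpos : 0 < L.length := List.length_pos_of_ne_nil hne
          have hget : L.getD (L.length - 1) 0 = t := by
            rw [List.getLast?_eq_getElem?] at hlast
            rw [List.getD_eq_getElem L 0 (by omega), ← Option.some_inj, ← hlast]
            exact (List.getElem?_eq_getElem (by omega)).symm
          have htx : t < x := by
            by_contra hxx
            have := pvScan_le L x (L.length - 1) (by omega) (by rw [hget]; exact hxx)
            omega
          simp [htx]
      rw [hstepA, hstepB]
      apply ih
      · rw [take_set_append T x s hslen, hL]
      · simp; try omega
      · simp at hbudget ⊢; try omega
      · rw [List.pairwise_append]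
        refine ⟨hsort, List.pairwise_singleton _ _, ?_⟩
        intro a ha b hb
        simp only [List.mem_singleton] at hb
        rcases List.getElem_of_mem ha with ⟨k, hk, hka⟩
        have := pvScan_prefix L x k (by omega)
        rw [List.getD_eq_getElem L 0 hk, hka] at this
        rw [hb]
        exact this.2
    · -- replace case
      have hclt : pvScan L x < s := by omega
      have hstepA : pvStepA (T, s) x = (T.set (pvScan L x) x, s) := by
        simp [pvStepA, hbs]; try omega
      have hstepB : pvStepB L x = L.set (pvScan L x) x := by
        unfold pvStepB
        have hpos : 0 < L.length := by omega
        match hlast : L.getLast? with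
        | none =>
          rw [List.getLast?_eq_none_iff] at hlast
          subst hlast
          simp at hpos
        | some t =>
          have hget : L.getD (L.length - 1) 0 = t := by
            rw [List.getLast?_eq_getElem?] at hlast
            rw [List.getD_eq_getElem L 0 (by omega), ← Option.some_inj, ← hlast]
            exact (List.getElem?_eq_getElem (by omega)).symm
          have htx : ¬ t < x := by
            intro hxx
            have := pvScan_ge L x (L.length - 1) hsort (by omega) (by rw [hget]; exact hxx)
            omega
          simp [htx]
      rw [hstepA, hstepB]
      apply ih
      · rw [take_set_lt T x _ s hclt, hL]
      · simp; try omega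
      · simp at hbudget ⊢; try omega
      · exact pairwise_set_scan L x hsort (by omega)

-- ===== VERDICT (by name: the statement is the Claim_ definition above) =====
theorem nlgn_longest_nondecreasing_subsequence_length_spec : Claim_equal_nlgn_longest_nondecreasing_subsequence_length := by
  intro A _
  unfold Spec_nlgn_longest_nondecreasing_subsequence_length
  unfold nlgn_longest_nondecreasing_subsequence_length nlgn_longest_nondecreasing_subsequence_length_alt
  have := pv_loop_eq A (List.replicate A.length 1) 0 []
    (by simp) (by simp) (by simp) (List.Pairwise.nil)
  exact_mod_cast this
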